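-- pv_equiv track=rewrite | github.com/danielfess/Think-Python | metathesis.py | metathesis
-- ===== SOURCE A (Python) =====
-- def metathesis(str1,str2):
--     """Returns True if the two strings form a metathesis pair.
--
--     str1, str2: strings
--
--     output: bool
--     """
--
--     if sorted(str1) != sorted(str2):
--         return False
--     differ = 0
--     for i in range(len(str1)):
--         if str1[i] != str2[i]:
--             differ += 1
--     if differ == 2:
--         return True
--     return False
-- ===== SOURCE B (Python) =====
-- def metathesis(str1, str2):
--     """Returns True if the two strings form a metathesis pair."""
--     if len(str1) != len(str2):
--         return False
--     diffs = [(a, b) for a, b in zip(str1, str2) if a != b]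
--     return len(diffs) == 2 and diffs[0] == (diffs[1][1], diffs[1][0])
-- ===== Notes on version B (the rewrite author's own statement) =====
-- stated objective: faster
-- what changed: Instead of sorting both strings and counting mismatched positions in a second indexed pass, B makes one zip pass collecting the differing character pairs and checks there are exactly two and that they are swaps of each other (no sorting at all).
import Mathlib
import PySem

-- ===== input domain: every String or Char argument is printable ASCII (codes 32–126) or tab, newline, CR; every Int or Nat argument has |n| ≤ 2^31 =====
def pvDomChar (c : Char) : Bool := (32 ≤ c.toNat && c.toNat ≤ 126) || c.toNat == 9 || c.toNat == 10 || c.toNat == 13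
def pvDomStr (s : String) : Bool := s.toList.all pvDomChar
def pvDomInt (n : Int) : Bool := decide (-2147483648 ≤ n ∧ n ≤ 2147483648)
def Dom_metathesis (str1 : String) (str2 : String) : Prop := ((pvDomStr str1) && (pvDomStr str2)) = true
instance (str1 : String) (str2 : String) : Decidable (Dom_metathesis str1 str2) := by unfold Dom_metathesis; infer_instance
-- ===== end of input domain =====

-- B replaces A's sort-both-strings-then-count-mismatches algorithm by a single zip pass
-- collecting the differing character pairs and checking they are exactly two swapped pairs.

-- ===== PORT A =====
-- A: if sorted(str1) != sorted(str2): return False; then count the positions where the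
-- strings differ and return (differ == 2).  str1[i]/str2[i] are always in range when the
-- loop runs (the sorted-equality guard forces equal lengths), so pyGetD with a dummy
-- default is exact there.
def metathesis (str1 : String) (str2 : String) : Bool :=
  let l1 := str1.toList
  let l2 := str2.toList
  if PySem.List.sorted l1 (fun c => c) false ≠ PySem.List.sorted l2 (fun c => c) false then
    false
  else
    if ((PySem.List.pyRange 0 (PySem.List.len l1) 1).foldl
        (fun acc i =>
          if PySem.List.pyGetD l1 i ' ' ≠ PySem.List.pyGetD l2 i ' ' then acc + 1 else acc)
        (0 : Int)) = 2 then true else false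

-- ===== PORT B =====
-- the differing pairs of two zipped strings (B's 'diffs' comprehension)
def pvDiffs (l1 l2 : List Char) : List (Char × Char) :=
  (l1.zip l2).filter (fun p => p.1 ≠ p.2)

-- B: length check, one zip pass filtering the differing pairs, then the two pairs must be
-- swaps of each other.
def metathesis_alt (str1 : String) (str2 : String) : Bool :=
  let l1 := str1.toList
  let l2 := str2.toList
  if l1.length ≠ l2.length then false
  else
    match pvDiffs l1 l2 with
    | [(a, b), (c, d)] => a == d && b == c
    | _ => false

-- ===== PRECONDITION & SPEC =====
def Spec_metathesis (str1 : String) (str2 : String) (out : Bool) : Prop := out = metathesis_alt str1 str2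
instance (str1 : String) (str2 : String) (out : Bool) : Decidable (Spec_metathesis str1 str2 out) := by unfold Spec_metathesis; infer_instance

-- ===== CLAIM (what is proved, stated in full; the proofs are below) =====
def Claim_equal_metathesis : Prop := ∀ (str1 : String) (str2 : String), Dom_metathesis str1 str2 → Spec_metathesis str1 str2 (metathesis str1 str2)

-- ===== LEMMAS AND PROOFS =====

lemma pv_count_eq_diffs (l1 : List Char) :
    ∀ l2 : List Char, l1.length = l2.length →
    (List.range l1.length).countP
        (fun k => decide (l1.getD k ' ' ≠ l2.getD k ' ')) = (pvDiffs l1 l2).length := by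
  induction l1 with
  | nil => intro l2 h; simp [pvDiffs]
  | cons x xs ih =>
    intro l2 h
    cases l2 with
    | nil => simp at h
    | cons y ys =>
      simp only [List.length_cons, Nat.add_right_cancel_iff] at h
      have hthis := ih ys h
      simp only [pvDiffs] at hthis ⊢
      simp only [List.length_cons, List.range_succ_eq_map, List.countP_cons,
        List.countP_map, List.zip_cons_cons, List.filter_cons]
      by_cases hxy : x = y
      · simp [hxy]
        simpa [List.getD_eq_getElem?_getD] using hthis
      · simp [hxy, Nat.add_comm]
        simpa [List.getD_eq_getElem?_getD] using hthis

lemma pv_multiset_eq (l1 : List Char) :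
    ∀ l2 : List Char, l1.length = l2.length →
    (l1 : Multiset Char) + ↑((pvDiffs l1 l2).map Prod.snd)
      = (l2 : Multiset Char) + ↑((pvDiffs l1 l2).map Prod.fst) := by
  induction l1 with
  | nil => intro l2 h; cases l2 <;> simp_all [pvDiffs]
  | cons x xs ih =>
    intro l2 h
    cases l2 with
    | nil => simp at h
    | cons y ys =>
      simp only [List.length_cons, Nat.add_right_cancel_iff] at h
      have key := ih ys h
      simp only [pvDiffs, ne_eq] at key
      by_cases hxy : x = y
      · subst hxy
        simp only [pvDiffs, List.zip_cons_cons, List.filter_cons, ne_eq,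
          not_true_eq_false, decide_false, Bool.false_eq_true, if_false,
          ← Multiset.cons_coe, Multiset.cons_add]
        rw [key]
      · simp only [pvDiffs, List.zip_cons_cons, List.filter_cons, ne_eq, hxy,
          not_false_eq_true, decide_true, if_pos, List.map_cons,
          ← Multiset.cons_coe, Multiset.cons_add, Multiset.add_cons]
        rw [key]
        exact Multiset.cons_swap y x _

lemma pv_perm_iff (l1 l2 : List Char) (h : l1.length = l2.length) :
    l1.Perm l2 ↔ ((pvDiffs l1 l2).map Prod.fst).Perm ((pvDiffs l1 l2).map Prod.snd) := by
  have key := pv_multiset_eq l1 l2 h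
  constructor
  · intro hp
    rw [Multiset.coe_eq_coe.mpr hp] at key
    exact Multiset.coe_eq_coe.mp (add_left_cancel key).symm
  · intro hp
    rw [← Multiset.coe_eq_coe.mpr hp] at key
    exact Multiset.coe_eq_coe.mp (add_right_cancel key)

lemma pv_pair_perm {a b c d : Char} (hab : a ≠ b) :
    ([a, c].Perm [b, d]) ↔ (a = d ∧ c = b) := by
  constructor
  · intro hp
    have hcb : c = b := by
      have hb : b ∈ [a, c] := hp.mem_iff.mpr (by simp)
      rcases List.mem_cons.mp hb with h | h
      · exact absurd h.symm hab
      · exact (show b = c by simpa using h).symm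
    subst hcb
    have hm : a ::ₘ c ::ₘ (0 : Multiset Char) = c ::ₘ d ::ₘ 0 := Quot.sound hp
    rw [Multiset.cons_swap] at hm
    have h2 : a ::ₘ (0 : Multiset Char) = d ::ₘ 0 := (Multiset.cons_inj_right c).mp hm
    exact ⟨by simpa using h2, rfl⟩
  · rintro ⟨rfl, rfl⟩
    exact List.Perm.swap _ _ _

lemma pv_core (l1 l2 : List Char) :
    (if PySem.List.sorted l1 (fun c => c) false ≠ PySem.List.sorted l2 (fun c => c) false then
      false
    else
      if ((PySem.List.pyRange 0 (PySem.List.len l1) 1).foldl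
          (fun acc i =>
            if PySem.List.pyGetD l1 i ' ' ≠ PySem.List.pyGetD l2 i ' ' then acc + 1 else acc)
          (0 : Int)) = 2 then true else false)
    = (if l1.length ≠ l2.length then false
      else
        match pvDiffs l1 l2 with
        | [(a, b), (c, d)] => a == d && b == c
        | _ => false) := by
  by_cases hlen : l1.length = l2.length
  · rw [if_neg (by simp [hlen] : ¬ l1.length ≠ l2.length)]
    have hcount :
        ((PySem.List.pyRange 0 (PySem.List.len l1) 1).foldl
          (fun acc i =>
            if PySem.List.pyGetD l1 i ' ' ≠ PySem.List.pyGetD l2 i ' ' then acc + 1 else acc)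
          (0 : Int)) = ((pvDiffs l1 l2).length : Int) := by
      rw [PySem.List.foldl_ite_add_one]
      rw [show PySem.List.pyRange 0 (PySem.List.len l1) 1
            = (List.range l1.length).map (fun k : Nat => (k : Int)) by
          rw [PySem.List.pyRange_one]; simp]
      rw [List.countP_map]
      rw [show ((List.range l1.length).countP
            ((fun i => decide (PySem.List.pyGetD l1 i ' ' ≠ PySem.List.pyGetD l2 i ' '))
              ∘ (fun k : Nat => (k : Int))))
          = (List.range l1.length).countP
              (fun k => decide (l1.getD k ' ' ≠ l2.getD k ' ')) from
        List.countP_congr (fun k _ => by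
          simp [PySem.List.pyGetD_natCast])]
      rw [pv_count_eq_diffs l1 l2 hlen]
      omega
    have hsorted := PySem.List.sorted_id_eq_sorted_id_iff_perm l1 l2
    have hperm := pv_perm_iff l1 l2 hlen
    by_cases hs : PySem.List.sorted l1 (fun c => c) false
        = PySem.List.sorted l2 (fun c => c) false
    · rw [if_neg (not_not_intro hs), hcount]
      have hp : l1.Perm l2 := hsorted.mp hs
      have hdp := hperm.mp hp
      rcases hd : pvDiffs l1 l2 with _ | ⟨⟨a, b⟩, _ | ⟨⟨c, d⟩, rest⟩⟩
      · norm_num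
      · norm_num
      · cases rest with
        | nil =>
          rw [hd] at hdp
          have hab : a ≠ b := by
            have hmem : (a, b) ∈ pvDiffs l1 l2 := by rw [hd]; simp
            simp only [pvDiffs, List.mem_filter] at hmem
            simpa using hmem.2
          simp only [List.map_cons, List.map_nil] at hdp
          obtain ⟨h1, h2⟩ := (pv_pair_perm hab).mp hdp
          simp [h1, h2]
        | cons p t =>
          rw [if_neg (by simp; omega)]
    · rw [if_pos hs]
      have hnp : ¬ l1.Perm l2 := fun hp => hs (hsorted.mpr hp)
      rcases hd : pvDiffs l1 l2 with _ | ⟨⟨a, b⟩, _ | ⟨⟨c, d⟩, rest⟩⟩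
      · rfl
      · rfl
      · cases rest with
        | nil =>
          show false = (a == d && b == c)
          rcases hcon : (a == d && b == c) with _ | _
          · rfl
          · exfalso
            obtain ⟨h1, h2⟩ := Bool.and_eq_true _ _ |>.mp hcon
            apply hnp
            apply hperm.mpr
            rw [hd]
            simp only [List.map_cons, List.map_nil]
            rw [show a = d by simpa using h1, show b = c by simpa using h2]
            exact List.Perm.swap _ _ _
        | cons p t => rfl
  · have hs : PySem.List.sorted l1 (fun c => c) false
        ≠ PySem.List.sorted l2 (fun c => c) false := by
      intro h
      apply hlen
      calc l1.length
          = (PySem.List.sorted l1 (fun c => c) false).length :=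
            (PySem.List.sorted_perm l1 (fun c => c) false).length_eq.symm
        _ = (PySem.List.sorted l2 (fun c => c) false).length := by rw [h]
        _ = l2.length := (PySem.List.sorted_perm l2 (fun c => c) false).length_eq
    rw [if_pos hs, if_pos hlen]

-- ===== VERDICT (by name: the statement is the Claim_ definition above) =====
theorem metathesis_spec : Claim_equal_metathesis := by
  intro str1 str2 _
  unfold Spec_metathesis metathesis metathesis_alt
  exact pv_core str1.toList str2.toList
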